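-- pv_equiv track=rewrite | github.com/youthlx/ToLuLu | practice/answer.py | have_boom_in_mine
-- ===== SOURCE A (Python) =====
-- puke_code = {
-- 	'3': 3, '4': 4, '5': 5, '6': 6, '7': 7, '8': 8, '9': 9, '10': 10,
-- 	'J': 11, 'Q': 12, 'K': 13, 'A': 14, '2': 16, 'black_joker': 17, 'color_joker': 18,
-- }
--
-- puke_code_reverse = {
-- 	3: '3', 4: '4', 5: '5', 6: '6', 7: '7', 8: '8', 9: '9', 10: '10',
-- 	11: 'J', 12: 'Q', 13: 'K', 14: 'A', 16: '2', 17: 'black_joker', 18: 'color_joker',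
-- }
--
-- def decode_and_tidy(*args):
-- 	cards = [puke_code[arg] for arg in args]
-- 	cards.sort()
-- 	return cards
--
-- def encode_card(*args):
-- 	return [puke_code_reverse[arg] for arg in args]
--
-- def have_boom_in_mine(card_list):
-- 	cards = decode_and_tidy(*card_list)
-- 	if 17 in cards and 18 in cards:
-- 		return encode_card(17, 18)
-- 	if len(cards) < 4:
-- 		return []
-- 	for i in range(len(cards) - 3):
-- 		if cards[i] == cards[i + 3]:
-- 			return encode_card(cards[i], cards[i], cards[i], cards[i])
-- 	return []
-- ===== SOURCE B (Python) =====
-- puke_code = {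
-- 	'3': 3, '4': 4, '5': 5, '6': 6, '7': 7, '8': 8, '9': 9, '10': 10,
-- 	'J': 11, 'Q': 12, 'K': 13, 'A': 14, '2': 16, 'black_joker': 17, 'color_joker': 18,
-- }
--
-- puke_code_reverse = {
-- 	3: '3', 4: '4', 5: '5', 6: '6', 7: '7', 8: '8', 9: '9', 10: '10',
-- 	11: 'J', 12: 'Q', 13: 'K', 14: 'A', 16: '2', 17: 'black_joker', 18: 'color_joker',
-- }
--
-- def have_boom_in_mine(card_list):
-- 	vals = [puke_code[card] for card in card_list]
-- 	if 17 in vals and 18 in vals: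
-- 		return ['black_joker', 'color_joker']
-- 	quads = [v for v in vals if vals.count(v) >= 4]
-- 	if quads:
-- 		return [puke_code_reverse[min(quads)]] * 4
-- 	return []
-- ===== Notes on version B (the rewrite author's own statement) =====
-- stated objective: simpler
-- what changed: Replaced the sort + consecutive-window index scan with a direct count-based filter: B keeps decoded values unsorted, collects values occurring at least 4 times, and returns min of them; the rocket check stays first and decoding stays eager so KeyError behaviour is unchanged.
import Mathlib
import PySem

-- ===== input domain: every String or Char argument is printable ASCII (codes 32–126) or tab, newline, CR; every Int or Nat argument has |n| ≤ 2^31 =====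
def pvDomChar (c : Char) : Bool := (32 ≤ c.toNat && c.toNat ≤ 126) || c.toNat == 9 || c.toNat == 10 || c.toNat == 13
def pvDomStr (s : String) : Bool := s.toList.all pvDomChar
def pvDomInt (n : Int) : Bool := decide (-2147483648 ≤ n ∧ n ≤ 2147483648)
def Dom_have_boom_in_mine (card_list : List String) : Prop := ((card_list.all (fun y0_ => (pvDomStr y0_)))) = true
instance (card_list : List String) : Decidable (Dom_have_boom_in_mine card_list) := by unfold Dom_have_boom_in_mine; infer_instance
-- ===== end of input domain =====

-- B replaces A's sort + consecutive-window scan by a count-based filter and min; objective: simpler.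


-- ===== PORT A =====
-- the module's dicts, shared context of A and B
def pukeCode : PySem.Dict String Int := PySem.Dict.ofList
  [("3", 3), ("4", 4), ("5", 5), ("6", 6), ("7", 7), ("8", 8), ("9", 9), ("10", 10),
   ("J", 11), ("Q", 12), ("K", 13), ("A", 14), ("2", 16), ("black_joker", 17), ("color_joker", 18)]
def pukeCodeReverse : PySem.Dict Int String := PySem.Dict.ofList
  [(3, "3"), (4, "4"), (5, "5"), (6, "6"), (7, "7"), (8, "8"), (9, "9"), (10, "10"),
   (11, "J"), (12, "Q"), (13, "K"), (14, "A"), (16, "2"), (17, "black_joker"), (18, "color_joker")]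

-- decode_and_tidy: [puke_code[arg] for arg in args]; cards.sort().  none = KeyError (excluded by Pre_)
def decode_and_tidy (args : List String) : Option (List Int) :=
  (args.mapM (fun a => pukeCode.get? a)).map (fun cards => PySem.List.sorted cards (fun x => x) false)

-- encode_card: [puke_code_reverse[arg] for arg in args]; all values used are keys, so getD "" never fires
def encode_card (args : List Int) : List String :=
  args.map (fun a => (pukeCodeReverse.get? a).getD "")

-- the 'for i in range(len(cards)-3): if cards[i] == cards[i+3]: return …' scan
def boomScan : List Int → Option Int
  | a :: b :: c :: d :: t => if a = d then some a else boomScan (b :: c :: d :: t)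
  | _ => none

def have_boom_in_mine (card_list : List String) : List String :=
  match decode_and_tidy card_list with
  | none => []   -- KeyError: outside Pre_
  | some cards =>
    if 17 ∈ cards ∧ 18 ∈ cards then encode_card [17, 18]
    else if cards.length < 4 then []
    else match boomScan cards with
      | some v => encode_card [v, v, v, v]
      | none => []

-- ===== PORT B =====
def have_boom_in_mine_alt (card_list : List String) : List String :=
  match card_list.mapM (fun c => pukeCode.get? c) with
  | none => []   -- KeyError: outside Pre_
  | some vals =>
    if 17 ∈ vals ∧ 18 ∈ vals then ["black_joker", "color_joker"]
    else
      let quads := vals.filter (fun v => 4 ≤ vals.count v)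
      match PySem.List.min? quads (fun x => x) with
      | some m => List.replicate 4 ((pukeCodeReverse.get? m).getD "")
      | none => []

-- ===== PRECONDITION & SPEC =====
-- A raises KeyError on any card name that is not a key of puke_code; exactly those inputs are excluded.
def Pre_have_boom_in_mine (card_list : List String) : Prop :=
  ∀ c ∈ card_list, c ∈ ["3", "4", "5", "6", "7", "8", "9", "10", "J", "Q", "K", "A", "2", "black_joker", "color_joker"]
instance (card_list : List String) : Decidable (Pre_have_boom_in_mine card_list) := by unfold Pre_have_boom_in_mine; infer_instance
def pvWitness_have_boom_in_mine : List String := ["3", "3", "3", "3", "black_joker"]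

def Spec_have_boom_in_mine (card_list : List String) (out : List String) : Prop := out = have_boom_in_mine_alt card_list
instance (card_list : List String) (out : List String) : Decidable (Spec_have_boom_in_mine card_list out) := by unfold Spec_have_boom_in_mine; infer_instance

-- ===== CLAIM (what is proved, stated in full; the proofs are below) =====
def Claim_equal_have_boom_in_mine : Prop := ∀ (card_list : List String), Dom_have_boom_in_mine card_list → Pre_have_boom_in_mine card_list → Spec_have_boom_in_mine card_list (have_boom_in_mine card_list)

-- ===== LEMMAS AND PROOFS =====

theorem mapM_isSome_of_pre (card_list : List String)
    (h : Pre_have_boom_in_mine card_list) :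
    ∃ vals, card_list.mapM (fun c => pukeCode.get? c) = some vals := by
  induction card_list with
  | nil => exact ⟨[], rfl⟩
  | cons c t ih =>
    obtain ⟨vt, hvt⟩ := ih (fun x hx => h x (List.mem_cons_of_mem _ hx))
    have hc : c ∈ ["3", "4", "5", "6", "7", "8", "9", "10", "J", "Q", "K", "A", "2", "black_joker", "color_joker"] :=
      h c List.mem_cons_self
    have hcs : ∃ v, pukeCode.get? c = some v := by
      fin_cases hc <;> exact ⟨_, rfl⟩
    obtain ⟨v, hv⟩ := hcs
    exact ⟨v :: vt, by simp [List.mapM_cons, hv, hvt]⟩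

theorem min?_id_perm (l l' : List Int) (h : l.Perm l') :
    PySem.List.min? l (fun x => x) = PySem.List.min? l' (fun x => x) := by
  cases hl : PySem.List.min? l (fun x => x) with
  | none =>
    rw [PySem.List.min?_eq_none_iff] at hl
    subst hl
    rw [eq_comm, PySem.List.min?_eq_none_iff]
    exact h.symm.eq_nil
  | some m =>
    cases hl' : PySem.List.min? l' (fun x => x) with
    | none =>
      rw [PySem.List.min?_eq_none_iff] at hl'
      subst hl'
      rw [h.eq_nil] at hl
      simp [PySem.List.min?] at hl
    | some m' =>
      have h1 := PySem.List.min?_isMin hl m' (h.mem_iff.mpr (PySem.List.min?_mem hl'))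
      have h2 := PySem.List.min?_isMin hl' m (h.mem_iff.mp (PySem.List.min?_mem hl))
      simp only [Option.some.injEq]
      omega

theorem boomScan_eq_min (s : List Int) (hs : s.Pairwise (· ≤ ·)) :
    boomScan s = PySem.List.min? (s.filter (fun v => 4 ≤ s.count v)) (fun x => x) := by
  induction s using boomScan.induct with
  | case1 b c d t =>
    -- first and fourth card equal: the first four are all equal, d is the global minimum, count ≥ 4
    obtain ⟨h1, hs1⟩ := List.pairwise_cons.mp hs
    obtain ⟨h2, hs2⟩ := List.pairwise_cons.mp hs1
    obtain ⟨h3, _⟩ := List.pairwise_cons.mp hs2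
    have hb : b = d := le_antisymm (h2 d (by simp)) (h1 b (by simp))
    have hc : c = d := le_antisymm (h3 d (by simp)) (h1 c (by simp))
    subst hb; subst hc
    have hcnt : 4 ≤ (c :: c :: c :: c :: t).count c := by
      simp
    have hfil : (c :: c :: c :: c :: t).filter (fun v => 4 ≤ (c :: c :: c :: c :: t).count v)
        = c :: ((c :: c :: c :: t).filter (fun v => 4 ≤ (c :: c :: c :: c :: t).count v)) := by
      rw [List.filter_cons_of_pos (by simp)]
    rw [hfil]
    cases hm : PySem.List.min? (c :: ((c :: c :: c :: t).filter
        (fun v => 4 ≤ (c :: c :: c :: c :: t).count v))) (fun x => x) with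
    | none => simp [PySem.List.min?_eq_none_iff] at hm
    | some m =>
      have hmem := PySem.List.min?_mem hm
      have hma := PySem.List.min?_isMin hm c (by simp)
      have ham : c ≤ m := by
        rcases List.mem_cons.mp hmem with rfl | hmem'
        · exact le_refl _
        · exact h1 m (List.mem_of_mem_filter hmem')
      have hmb : m = c := le_antisymm hma ham
      subst hmb
      simp [boomScan]
  | case2 a b c d t had ih =>
    -- a ≠ d: a occurs at most 3 times, so the head is dropped and counts in the tail agree
    obtain ⟨h1, hs1⟩ := List.pairwise_cons.mp hs
    have had' : a < d := lt_of_le_of_ne (h1 d (by simp)) had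
    have hdt : ∀ x ∈ t, d ≤ x := by
      obtain ⟨_, hs2⟩ := List.pairwise_cons.mp hs1
      obtain ⟨_, hs3⟩ := List.pairwise_cons.mp hs2
      exact (List.pairwise_cons.mp hs3).1
    have hta : t.count a = 0 := by
      rw [List.count_eq_zero]
      intro hmem
      exact absurd rfl (ne_of_gt (lt_of_lt_of_le had' (hdt a hmem)))
    have hda : ¬ (d = a) := fun h => had h.symm
    have htail : (b :: c :: d :: t).count a ≤ 2 := by
      simp only [List.count_cons, hta, beq_iff_eq]
      split_ifs <;> omega
    have hhead3 : (a :: b :: c :: d :: t).count a = (b :: c :: d :: t).count a + 1 := by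
      simp [List.count_cons]
    have hhead : ¬ (4 ≤ (a :: b :: c :: d :: t).count a) := by omega
    have hfil1 : (a :: b :: c :: d :: t).filter (fun v => 4 ≤ (a :: b :: c :: d :: t).count v)
        = (b :: c :: d :: t).filter (fun v => 4 ≤ (a :: b :: c :: d :: t).count v) := by
      rw [List.filter_cons_of_neg (by simpa using hhead)]
    have hfil2 : (b :: c :: d :: t).filter (fun v => 4 ≤ (a :: b :: c :: d :: t).count v)
        = (b :: c :: d :: t).filter (fun v => 4 ≤ (b :: c :: d :: t).count v) := by
      apply List.filter_congr
      intro x hx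
      by_cases hxa : x = a
      · subst hxa
        simp only [decide_eq_decide]
        omega
      · have hcc : (a :: b :: c :: d :: t).count x = (b :: c :: d :: t).count x := by
          rw [List.count_cons_of_ne (fun h => hxa h.symm)]
        rw [hcc]
    rw [hfil1, hfil2, ← ih hs1]
    simp [boomScan, had]
  | case3 t hshape =>
    -- fewer than four cards: every count is below 4, so there is no boom on either side
    have hlen : t.length ≤ 3 := by
      match t, hshape with
      | [], _ => simp
      | [_], _ => simp
      | [_, _], _ => simp
      | [_, _, _], _ => simp
      | a :: b :: c :: d :: t1, h => exact (h a b c d t1 rfl).elim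
    have hfil : t.filter (fun v => 4 ≤ t.count v) = [] := by
      rw [List.filter_eq_nil_iff]
      intro v hv
      have := List.count_le_length (a := v) (l := t)
      simp only [decide_eq_true_eq]
      omega
    have hscan : boomScan t = none := by
      match t, hshape with
      | [], _ => rfl
      | [_], _ => rfl
      | [_, _], _ => rfl
      | [_, _, _], _ => rfl
      | a :: b :: c :: d :: t1, h => exact (h a b c d t1 rfl).elim
    rw [hfil, hscan]
    rfl


theorem have_boom_in_mine_spec : Claim_equal_have_boom_in_mine := by
  intro card_list _ hpre
  obtain ⟨vals, hv⟩ := mapM_isSome_of_pre card_list hpre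
  unfold Spec_have_boom_in_mine have_boom_in_mine have_boom_in_mine_alt decode_and_tidy
  rw [hv]
  simp only [Option.map_some]
  have hperm : (PySem.List.sorted vals (fun x => x) false).Perm vals :=
    PySem.List.sorted_perm vals (fun x => x) false
  set s := PySem.List.sorted vals (fun x => x) false with hsdef
  have hmem : ∀ x : Int, x ∈ s ↔ x ∈ vals := fun x => hperm.mem_iff
  by_cases hr : 17 ∈ vals ∧ 18 ∈ vals
  · rw [if_pos (show (17 : Int) ∈ s ∧ (18 : Int) ∈ s from ⟨(hmem 17).mpr hr.1, (hmem 18).mpr hr.2⟩), if_pos hr]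
    rfl
  · rw [if_neg (fun h => hr ⟨(hmem 17).mp h.1, (hmem 18).mp h.2⟩), if_neg hr]
    have hcnt : ∀ v : Int, s.count v = vals.count v := fun v => hperm.count_eq v
    have hfilp : s.filter (fun v => 4 ≤ s.count v) = s.filter (fun v => 4 ≤ vals.count v) := by
      apply List.filter_congr
      intro x _
      rw [hcnt x]
    have hminEq : PySem.List.min? (s.filter (fun v => 4 ≤ s.count v)) (fun x => x)
        = PySem.List.min? (vals.filter (fun v => 4 ≤ vals.count v)) (fun x => x) := by
      rw [hfilp]
      exact min?_id_perm _ _ (hperm.filter _)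
    have hscan : boomScan s = PySem.List.min? (vals.filter (fun v => 4 ≤ vals.count v)) (fun x => x) := by
      rw [boomScan_eq_min s (by simpa using PySem.List.sorted_pairwise vals (fun x => x)), hminEq]
    by_cases hlen : s.length < 4
    · rw [if_pos hlen]
      have hfil : vals.filter (fun v => 4 ≤ vals.count v) = [] := by
        rw [List.filter_eq_nil_iff]
        intro v hv
        have h1 := List.count_le_length (a := v) (l := vals)
        have h2 : vals.length = s.length := hperm.symm.length_eq
        simp only [decide_eq_true_eq]
        omega
      rw [hfil]
      rfl
    · rw [if_neg hlen, hscan]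
      cases PySem.List.min? (vals.filter (fun v => 4 ≤ vals.count v)) (fun x => x) with
      | none => rfl
      | some m => simp [encode_card, List.replicate]
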